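-- pv_equiv track=rewrite | github.com/EMCLab-Sinica/iPrune | ExpTests/intermittent-cnn/transform.py | nchw2nhwc
-- ===== SOURCE A (Python) =====
-- def nchw2nhwc(arr, dims):
--     N, C, H, W = dims
--     ret = [0] * (N * C * H * W)
--     for n in range(N):
--         for c in range(C):
--             for h in range(H):
--                 for w in range(W):
--                     old_idx = n * C * H * W + c * H * W + h * W + w
--                     new_idx = n * H * W * C + h * W * C + w * C + c
--                     ret[new_idx] = arr[old_idx]
--     return ret, (N, H, W, C)
-- ===== SOURCE B (Python) =====
-- def nchw2nhwc(arr, dims):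
--     N, C, H, W = dims
--     hw = H * W
--     chw = C * hw
--     ret = []
--     for n in range(N):
--         seg = arr[n * chw:(n + 1) * chw]
--         chunks = [seg[c * hw:(c + 1) * hw] for c in range(C)]
--         for tup in zip(*chunks):
--             ret.extend(tup)
--     return ret, (N, H, W, C)
-- ===== Notes on version B (the rewrite author's own statement) =====
-- stated objective: simpler
-- what changed: Replaces A's quadruple nested loop with per-element old_idx/new_idx arithmetic into a preallocated buffer by, per batch, slicing the array into C contiguous chunks of length H*W and transposing them with zip(*chunks), extending the output with each resulting tuple.
-- outside the precondition, e.g. on nchw2nhwc([], (-2, -2, 1, 1)): A returns ([0, 0, 0, 0], (-2, 1, 1, -2)), B returns ([], (-2, 1, 1, -2))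
import Mathlib
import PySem

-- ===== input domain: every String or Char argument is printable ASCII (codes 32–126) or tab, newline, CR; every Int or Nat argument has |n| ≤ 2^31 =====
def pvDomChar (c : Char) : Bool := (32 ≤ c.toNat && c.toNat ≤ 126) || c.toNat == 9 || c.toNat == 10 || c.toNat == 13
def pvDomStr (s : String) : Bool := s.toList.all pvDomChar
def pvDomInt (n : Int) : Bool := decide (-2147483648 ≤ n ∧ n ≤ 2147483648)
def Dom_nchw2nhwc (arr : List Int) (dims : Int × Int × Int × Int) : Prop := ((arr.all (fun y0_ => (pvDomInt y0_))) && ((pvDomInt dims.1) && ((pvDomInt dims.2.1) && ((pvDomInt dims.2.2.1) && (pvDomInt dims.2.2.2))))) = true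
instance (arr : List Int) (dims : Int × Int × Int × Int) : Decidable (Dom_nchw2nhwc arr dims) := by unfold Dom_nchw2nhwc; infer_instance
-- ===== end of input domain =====

-- B replaces A's quadruple loop of index arithmetic by per-batch slicing into C chunks of
-- length H*W and a zip-style matrix transpose (objective: simpler decomposition, same cost).


-- ===== PORT A =====
def nchw2nhwc (arr : List Int) (dims : Int × Int × Int × Int) : List Int × (Int × Int × Int × Int) :=
  match dims with
  | (N, C, H, W) =>
    let ret0 := PySem.List.pyRepeat [(0 : Int)] (N * C * H * W)      -- ret = [0] * (N*C*H*W)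
    let ret := (PySem.List.pyRange 0 N 1).foldl (fun ret n =>
      (PySem.List.pyRange 0 C 1).foldl (fun ret c =>
        (PySem.List.pyRange 0 H 1).foldl (fun ret h =>
          (PySem.List.pyRange 0 W 1).foldl (fun ret w =>
            let old_idx := n * C * H * W + c * H * W + h * W + w
            let new_idx := n * H * W * C + h * W * C + w * C + c
            PySem.List.pySetD ret new_idx (PySem.List.pyGetD arr old_idx 0)) ret) ret) ret) ret0
    (ret, (N, H, W, C))

-- ===== PORT B =====
-- zip(*chunks) ported by hand (PySem has no variadic zip): emit the tuple of heads, recurse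
-- on the tails, stop as soon as some list is exhausted — exact for Python's zip over lists.
def pvZipGo : List Int → List (List Int) → List (List Int)
  | [], _ => []
  | x :: xs, ls =>
    if ls.any List.isEmpty then []
    else (x :: ls.map (fun l => l.headD 0)) :: pvZipGo xs (ls.map List.tail)

def pvTransposeZip : List (List Int) → List (List Int)
  | [] => []
  | l :: ls => pvZipGo l ls

def nchw2nhwc_alt (arr : List Int) (dims : Int × Int × Int × Int) : List Int × (Int × Int × Int × Int) :=
  match dims with
  | (N, C, H, W) =>
    let hw := H * W
    let chw := C * hw
    let ret := (PySem.List.pyRange 0 N 1).foldl (fun ret n =>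
      let seg := PySem.List.slice arr (some (n * chw)) (some ((n + 1) * chw))
      let chunks := (PySem.List.pyRange 0 C 1).map (fun c =>
        PySem.List.slice seg (some (c * hw)) (some ((c + 1) * hw)))
      (pvTransposeZip chunks).foldl (fun ret tup => ret ++ tup) ret) []
    (ret, (N, H, W, C))

-- ===== PRECONDITION & SPEC =====
-- Pre_ excludes arrays shorter than N*C*H*W (there A raises IndexError) and the meaningless
-- negative-dimension corners where the two accidental degenerate values need not coincide
-- (A's '[0]*(N*C*H*W)' padding vs what B's negative-bound slices happen to produce); the
-- degenerate inputs on which both sides naturally yield the empty tensor stay admitted.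
def Pre_nchw2nhwc (arr : List Int) (dims : Int × Int × Int × Int) : Prop :=
  (0 ≤ dims.1 ∧ 0 ≤ dims.2.1 ∧ 0 ≤ dims.2.2.1 ∧ 0 ≤ dims.2.2.2 ∧
    dims.1 * dims.2.1 * dims.2.2.1 * dims.2.2.2 ≤ (arr.length : Int)) ∨
  (dims.1 * dims.2.1 * dims.2.2.1 * dims.2.2.2 ≤ 0 ∧
    (dims.1 ≤ 0 ∨ dims.2.1 ≤ 0 ∨ dims.2.2.1 * dims.2.2.2 = 0))
instance (arr : List Int) (dims : Int × Int × Int × Int) : Decidable (Pre_nchw2nhwc arr dims) := by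
  unfold Pre_nchw2nhwc; infer_instance

def pvWitness_nchw2nhwc : List Int × (Int × Int × Int × Int) := ([1, 2, 3, 4, 5, 6], (1, 3, 2, 1))

def Spec_nchw2nhwc (arr : List Int) (dims : Int × Int × Int × Int) (out : List Int × (Int × Int × Int × Int)) : Prop := out = nchw2nhwc_alt arr dims
instance (arr : List Int) (dims : Int × Int × Int × Int) (out : List Int × (Int × Int × Int × Int)) : Decidable (Spec_nchw2nhwc arr dims out) := by unfold Spec_nchw2nhwc; infer_instance

-- ===== CLAIM (what is proved, stated in full; the proofs are below) =====
def Claim_equal_nchw2nhwc : Prop := ∀ (arr : List Int) (dims : Int × Int × Int × Int), Dom_nchw2nhwc arr dims → Pre_nchw2nhwc arr dims → Spec_nchw2nhwc arr dims (nchw2nhwc arr dims)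


-- ===== LEMMAS AND PROOFS =====

-- one assignment step ret[p.1] = p.2
def pvSet1 (l : List Int) (p : Nat × Int) : List Int := l.set p.1 p.2

-- the assignments A performs, as one flat list (index, value), h and w merged into p = h*W+w
def pvAsg (arr : List Int) (N C H W : Nat) : List (Nat × Int) :=
  (List.range N).flatMap fun n => (List.range C).flatMap fun c => (List.range (H * W)).map fun p =>
    (n * (H * W * C) + p * C + c, arr.getD (n * (C * (H * W)) + c * (H * W) + p) 0)

-- value of output position j, decoding j = n*(H*W*C) + p*C + c
def pvIdx (arr : List Int) (C H W : Nat) (j : Nat) : Int :=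
  arr.getD ((j / (H * W * C)) * (C * (H * W)) + ((j % (H * W * C)) % C) * (H * W) + (j % (H * W * C)) / C) 0

theorem pv_collapse {α : Type} (K L : Nat) (f : Nat → α) :
    (List.range K).flatMap (fun a => (List.range L).map (fun b => f (a * L + b))) =
      (List.range (K * L)).map f := by
  induction K with
  | zero => simp
  | succ k ih =>
    rw [List.range_succ, List.flatMap_append, ih, Nat.succ_mul, List.range_add, List.map_append]
    simp [List.map_map, Function.comp_def]

theorem pv_block_inj (K n n' r r' : Nat) (hr : r < K) (hr' : r' < K)
    (h : n * K + r = n' * K + r') : n = n' ∧ r = r' := by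
  have hK : 0 < K := by omega
  have e1 : (K * n + r) / K = n := by rw [Nat.mul_add_div hK, Nat.div_eq_of_lt hr]; omega
  have e2 : (K * n' + r') / K = n' := by rw [Nat.mul_add_div hK, Nat.div_eq_of_lt hr']; omega
  have hn : n = n' := by rw [← e1, ← e2, Nat.mul_comm K n, Nat.mul_comm K n', h]
  subst hn
  exact ⟨rfl, by omega⟩

theorem pv_sub_lt (p P c C : Nat) (hp : p < P) (hc : c < C) : p * C + c < P * C := by
  calc p * C + c < p * C + C := by omega
    _ = (p + 1) * C := by ring
    _ ≤ P * C := Nat.mul_le_mul_right C hp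

theorem pv_enc_inj (C H W n c p n' c' p' : Nat) (hc : c < C) (hp : p < H * W)
    (hc' : c' < C) (hp' : p' < H * W)
    (h : n * (H * W * C) + p * C + c = n' * (H * W * C) + p' * C + c') :
    n = n' ∧ p = p' ∧ c = c' := by
  have h1 : n * (H * W * C) + (p * C + c) = n' * (H * W * C) + (p' * C + c') := by
    rw [← Nat.add_assoc, ← Nat.add_assoc]; exact h
  obtain ⟨hn, h2⟩ := pv_block_inj (H * W * C) n n' _ _ (pv_sub_lt p (H*W) c C hp hc)
    (pv_sub_lt p' (H*W) c' C hp' hc') h1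
  obtain ⟨hpp, hcc⟩ := pv_block_inj C p p' c c' hc hc' h2
  exact ⟨hn, hpp, hcc⟩

theorem pv_getD_zero (y : List Int) : y.getD 0 0 = y.headD 0 := by cases y <;> rfl

theorem pv_zipGo_flat (L : Nat) (l : List Int) (ls : List (List Int)) (hl : l.length = L)
    (h : ∀ x ∈ ls, x.length = L) :
    (pvZipGo l ls).flatten = (List.range L).flatMap (fun p => (l :: ls).map (fun x => x.getD p 0)) := by
  induction L generalizing l ls with
  | zero =>
    rw [List.eq_nil_of_length_eq_zero hl]
    simp [pvZipGo]
  | succ L ih =>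
    cases l with
    | nil => simp at hl
    | cons x xs =>
      have hg : ls.any List.isEmpty = false := by
        simp only [List.any_eq_false]
        intro y hy
        have := h y hy
        cases y with
        | nil => simp at this
        | cons a b => simp
      rw [pvZipGo, if_neg (by simp [hg]), List.flatten_cons,
        ih xs (ls.map List.tail) (by simpa using hl)
          (by intro y hy; obtain ⟨z, hz, rfl⟩ := List.mem_map.1 hy
              have := h z hz; cases z with
              | nil => simp at this
              | cons a b => simpa using this),
        List.range_succ_eq_map, List.flatMap_cons, List.flatMap_map]
      congr 1
      · simp only [List.map_cons, pv_getD_zero]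
        rfl
      · apply List.flatMap_congr
        intro p _
        simp [Function.comp_def, List.map_map]

theorem pv_transFlat (L : Nat) (ls : List (List Int)) (h : ∀ l ∈ ls, l.length = L) :
    (pvTransposeZip ls).flatten = (List.range L).flatMap (fun p => ls.map (fun l => l.getD p 0)) := by
  cases ls with
  | nil => simp [pvTransposeZip]
  | cons l t =>
    exact pv_zipGo_flat L l t (h l (by simp)) (fun x hx => h x (List.mem_cons_of_mem _ hx))

theorem pv_length_foldl_set (asg : List (Nat × Int)) (l : List Int) :
    (asg.foldl pvSet1 l).length = l.length := by
  induction asg generalizing l with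
  | nil => rfl
  | cons a t ih => simp [List.foldl_cons, ih, pvSet1]

theorem pv_foldl_set_not_mem (asg : List (Nat × Int)) (l : List Int) (j : Nat)
    (h : ∀ p ∈ asg, p.1 ≠ j) : (asg.foldl pvSet1 l)[j]? = l[j]? := by
  induction asg generalizing l with
  | nil => rfl
  | cons a t ih =>
    rw [List.foldl_cons, ih _ (fun p hp => h p (List.mem_cons_of_mem a hp))]
    exact List.getElem?_set_ne (h a List.mem_cons_self)

theorem pv_foldl_set_mem (asg : List (Nat × Int)) (l : List Int) (j : Nat) (v : Int)
    (hpw : asg.Pairwise (fun p q => p.1 ≠ q.1)) (hmem : (j, v) ∈ asg) (hj : j < l.length) :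
    (asg.foldl pvSet1 l)[j]? = some v := by
  induction asg generalizing l with
  | nil => simp at hmem
  | cons a t ih =>
    rw [List.foldl_cons]
    rcases List.mem_cons.1 hmem with heq | hmem'
    · subst heq
      have hne : ∀ p ∈ t, p.1 ≠ j := fun p hp => Ne.symm ((List.pairwise_cons.1 hpw).1 p hp)
      rw [pv_foldl_set_not_mem t _ j hne]
      simp [pvSet1, hj]
    · exact ih _ (List.pairwise_cons.1 hpw).2 hmem' (by simp [pvSet1, hj])

theorem pv_asg_pairwise (arr : List Int) (N C H W : Nat) :
    (pvAsg arr N C H W).Pairwise (fun p q => p.1 ≠ q.1) := by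
  unfold pvAsg
  rw [List.pairwise_flatMap]
  constructor
  · intro n hn
    rw [List.pairwise_flatMap]
    constructor
    · intro c hc
      have hcC : c < C := List.mem_range.1 hc
      rw [List.pairwise_map, List.pairwise_iff_getElem]
      intro i j hi hj hij heq
      simp only [List.getElem_range] at heq
      have h1 : n * (H * W * C) + (i * C + c) = n * (H * W * C) + (j * C + c) := by
        rw [← Nat.add_assoc, ← Nat.add_assoc]; exact heq
      obtain ⟨hi', -⟩ := pv_block_inj C i j c c hcC hcC (Nat.add_left_cancel h1)
      omega
    · rw [List.pairwise_iff_getElem]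
      intro i j hi hj hij x hx y hy heq
      simp only [List.length_range] at hi hj
      simp only [List.getElem_range] at hx hy
      obtain ⟨p, hp, rfl⟩ := List.mem_map.1 hx
      obtain ⟨q, hq, rfl⟩ := List.mem_map.1 hy
      obtain ⟨-, -, hcc⟩ := pv_enc_inj C H W n i p n j q hi (List.mem_range.1 hp) hj
        (List.mem_range.1 hq) heq
      omega
  · rw [List.pairwise_iff_getElem]
    intro i j hi hj hij x hx y hy heq
    simp only [List.length_range] at hi hj
    simp only [List.getElem_range] at hx hy
    obtain ⟨c, hc, hx'⟩ := List.mem_flatMap.1 hx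
    obtain ⟨p, hp, rfl⟩ := List.mem_map.1 hx'
    obtain ⟨c', hc', hy'⟩ := List.mem_flatMap.1 hy
    obtain ⟨q, hq, rfl⟩ := List.mem_map.1 hy'
    obtain ⟨hnn, -, -⟩ := pv_enc_inj C H W i c p j c' q (List.mem_range.1 hc)
      (List.mem_range.1 hp) (List.mem_range.1 hc') (List.mem_range.1 hq) heq
    omega

theorem pv_asg_mem (arr : List Int) (N C H W : Nat) (j : Nat) (hj : j < N * (H * W * C)) :
    (j, pvIdx arr C H W j) ∈ pvAsg arr N C H W := by
  have hK : 0 < H * W * C := by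
    rcases Nat.eq_zero_or_pos (H * W * C) with h | h
    · rw [h, Nat.mul_zero] at hj; omega
    · exact h
  have hC : 0 < C := by
    rcases Nat.eq_zero_or_pos C with h | h
    · rw [h] at hK; simp at hK
    · exact h
  unfold pvAsg
  rw [List.mem_flatMap]
  refine ⟨j / (H * W * C), List.mem_range.2 ((Nat.div_lt_iff_lt_mul hK).2 hj), ?_⟩
  rw [List.mem_flatMap]
  refine ⟨(j % (H * W * C)) % C, List.mem_range.2 (Nat.mod_lt _ hC), ?_⟩
  rw [List.mem_map]
  refine ⟨(j % (H * W * C)) / C, List.mem_range.2 ?_, ?_⟩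
  · exact (Nat.div_lt_iff_lt_mul hC).2 (Nat.mod_lt _ hK)
  · refine Prod.ext ?_ rfl
    show _ = j
    have h1 : (j % (H * W * C)) / C * C + (j % (H * W * C)) % C = j % (H * W * C) := by
      rw [Nat.mul_comm]; exact Nat.div_add_mod _ _
    have h2 : j / (H * W * C) * (H * W * C) + j % (H * W * C) = j := Nat.div_add_mod' _ _
    omega

theorem pv_fold4 (arr : List Int) (N C H W : Nat) (init : List Int) :
    (List.range N).foldl (fun ret n => (List.range C).foldl (fun ret c =>
      (List.range H).foldl (fun ret h => (List.range W).foldl (fun ret w =>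
        ret.set (n*H*W*C + h*W*C + w*C + c) (arr.getD (n*C*H*W + c*H*W + h*W + w) 0)) ret) ret) ret) init
    = (pvAsg arr N C H W).foldl pvSet1 init := by
  unfold pvAsg
  rw [List.foldl_flatMap]
  apply PySem.List.foldl_congr_mem
  intro acc n _
  rw [List.foldl_flatMap]
  apply PySem.List.foldl_congr_mem
  intro acc2 c _
  rw [← pv_collapse H W, List.foldl_flatMap]
  apply PySem.List.foldl_congr_mem
  intro acc3 h _
  rw [List.foldl_map]
  apply PySem.List.foldl_congr_mem
  intro acc4 w _
  show acc4.set (n*H*W*C + h*W*C + w*C + c) (arr.getD (n*C*H*W + c*H*W + h*W + w) 0)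
      = pvSet1 acc4 (n * (H * W * C) + (h*W+w) * C + c, arr.getD (n * (C * (H * W)) + c * (H * W) + (h*W+w)) 0)
  unfold pvSet1
  have e1 : n*H*W*C + h*W*C + w*C + c = n * (H * W * C) + (h*W+w) * C + c := by ring
  have e2 : n*C*H*W + c*H*W + h*W + w = n * (C * (H * W)) + c * (H * W) + (h*W+w) := by ring
  rw [e1, e2]

theorem pv_spec_eq_map (arr : List Int) (N C H W : Nat) :
    (List.range N).flatMap (fun n => (List.range (H * W)).flatMap (fun p =>
      (List.range C).map (fun c => arr.getD (n * (C * (H * W)) + c * (H * W) + p) 0))) =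
      (List.range (N * (H * W * C))).map (pvIdx arr C H W) := by
  have inner : ∀ n : Nat, (List.range (H * W)).flatMap (fun p =>
      (List.range C).map (fun c => arr.getD (n * (C * (H * W)) + c * (H * W) + p) 0)) =
      (List.range (H * W * C)).map (fun r => arr.getD (n * (C * (H * W)) + (r % C) * (H * W) + r / C) 0) := by
    intro n
    rw [← pv_collapse (H*W) C (fun r => arr.getD (n * (C * (H * W)) + (r % C) * (H * W) + r / C) 0)]
    apply List.flatMap_congr
    intro p hp
    apply List.map_congr_left
    intro c hc
    have hc' : c < C := List.mem_range.1 hc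
    have hC : 0 < C := by omega
    have e1 : (p * C + c) % C = c := by
      rw [Nat.mul_add_mod_self_right, Nat.mod_eq_of_lt hc']
    have e2 : (p * C + c) / C = p := by
      rw [Nat.mul_comm p C, Nat.mul_add_div hC, Nat.div_eq_of_lt hc']; omega
    rw [e1, e2]
  rw [← pv_collapse N (H*W*C) (pvIdx arr C H W)]
  apply List.flatMap_congr
  intro n hn
  rw [inner n]
  apply List.map_congr_left
  intro r hr
  have hr' : r < H * W * C := List.mem_range.1 hr
  have hK : 0 < H * W * C := by omega
  unfold pvIdx
  have d1 : (n * (H * W * C) + r) / (H * W * C) = n := by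
    rw [Nat.mul_comm n (H*W*C), Nat.mul_add_div hK, Nat.div_eq_of_lt hr']; omega
  have d2 : (n * (H * W * C) + r) % (H * W * C) = r := by
    rw [Nat.mul_add_mod_self_right, Nat.mod_eq_of_lt hr']
  rw [d1, d2]

theorem pv_A_eq (arr : List Int) (N C H W : Nat) :
    (nchw2nhwc arr ((N : Int), (C : Int), (H : Int), (W : Int))).1 =
      (List.range (N * (H * W * C))).map (pvIdx arr C H W) := by
  have hM : N * (H * W * C) = N*C*H*W := by ring
  unfold nchw2nhwc
  simp only [PySem.List.pyRange_zero_natCast, List.foldl_map, PySem.List.pyRepeat_singleton,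
    ← Nat.cast_mul, ← Nat.cast_add, PySem.List.pySetD_natCast, PySem.List.pyGetD_natCast,
    Int.toNat_natCast]
  rw [pv_fold4]
  apply List.ext_getElem?
  intro j
  by_cases hj : j < N*C*H*W
  · rw [pv_foldl_set_mem _ _ j (pvIdx arr C H W j) (pv_asg_pairwise arr N C H W)
      (pv_asg_mem arr N C H W j (by omega)) (by simp [List.length_replicate]; omega)]
    rw [List.getElem?_map, List.getElem?_range (by omega)]
    rfl
  · rw [List.getElem?_eq_none, List.getElem?_eq_none]
    · simp; omega
    · rw [pv_length_foldl_set]; simp; omega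

theorem pv_B_eq (arr : List Int) (N C H W : Nat) (hlen : N * C * H * W ≤ arr.length) :
    (nchw2nhwc_alt arr ((N : Int), (C : Int), (H : Int), (W : Int))).1 =
      (List.range (N * (H * W * C))).map (pvIdx arr C H W) := by
  unfold nchw2nhwc_alt
  simp only [PySem.List.pyRange_zero_natCast, List.foldl_map, List.map_map,
    PySem.List.foldl_append_eq_flatten, PySem.List.foldl_append_eq_flatMap]
  rw [List.nil_append, ← pv_spec_eq_map arr N C H W]
  apply List.flatMap_congr
  intro n hn
  have hn' : n < N := List.mem_range.1 hn
  simp only [Function.comp_def]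
  have eA : N * (C * (H * W)) = N * C * H * W := by ring
  have hnn : n * (C * (H * W)) + C * (H * W) ≤ arr.length := by
    have h1 : (n + 1) * (C * (H * W)) ≤ N * (C * (H * W)) :=
      Nat.mul_le_mul_right (C * (H * W)) (by omega)
    rw [Nat.succ_mul] at h1
    omega
  have hseg : PySem.List.slice arr (some ((n : Int) * (↑C * (↑H * ↑W))))
      (some (((n : Int) + 1) * (↑C * (↑H * ↑W)))) = (arr.drop (n * (C * (H * W)))).take (C * (H * W)) := by
    have c1 : ((n : Int) + 1) * (↑C * (↑H * ↑W)) = ((n * (C * (H * W)) + C * (H * W) : Nat) : Int) := by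
      push_cast; ring
    have c2 : ((n : Int)) * (↑C * (↑H * ↑W)) = ((n * (C * (H * W)) : Nat) : Int) := by
      push_cast; ring
    rw [c1, c2, PySem.List.slice_natCast]
    congr 1
    omega
  rw [hseg]
  have hchunk : ∀ c ∈ List.range C,
      PySem.List.slice ((arr.drop (n * (C * (H * W)))).take (C * (H * W)))
        (some ((c : Int) * (↑H * ↑W))) (some (((c : Int) + 1) * (↑H * ↑W)))
      = (arr.drop (n * (C * (H * W)) + c * (H * W))).take (H * W) := by
    intro c hc
    have hc' : c < C := List.mem_range.1 hc
    have hcc : c * (H * W) + H * W ≤ C * (H * W) := by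
      have h1 : (c + 1) * (H * W) ≤ C * (H * W) := Nat.mul_le_mul_right (H * W) (by omega)
      rw [Nat.succ_mul] at h1
      omega
    have c1 : ((c : Int) + 1) * (↑H * ↑W) = ((c * (H * W) + H * W : Nat) : Int) := by push_cast; ring
    have c2 : ((c : Int)) * (↑H * ↑W) = ((c * (H * W) : Nat) : Int) := by push_cast; ring
    rw [c1, c2, PySem.List.slice_natCast]
    have c3 : c * (H * W) + H * W - c * (H * W) = H * W := by omega
    rw [c3, List.drop_take, List.drop_drop, List.take_take]
    rw [Nat.min_eq_left (by omega)]
  rw [List.map_congr_left hchunk]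
  have hlens : ∀ l ∈ (List.range C).map
      (fun c => (arr.drop (n * (C * (H * W)) + c * (H * W))).take (H * W)), l.length = H * W := by
    intro l hl
    obtain ⟨c, hc, rfl⟩ := List.mem_map.1 hl
    have hc' : c < C := List.mem_range.1 hc
    have hcc : c * (H * W) + H * W ≤ C * (H * W) := by
      have h1 : (c + 1) * (H * W) ≤ C * (H * W) := Nat.mul_le_mul_right (H * W) (by omega)
      rw [Nat.succ_mul] at h1
      omega
    simp only [List.length_take, List.length_drop]
    omega
  rw [pv_transFlat (H * W) _ hlens]
  apply List.flatMap_congr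
  intro p hp
  have hp' : p < H * W := List.mem_range.1 hp
  rw [List.map_map]
  apply List.map_congr_left
  intro c hc
  have hc' : c < C := List.mem_range.1 hc
  have hcc : c * (H * W) + H * W ≤ C * (H * W) := by
    have h1 : (c + 1) * (H * W) ≤ C * (H * W) := Nat.mul_le_mul_right (H * W) (by omega)
    rw [Nat.succ_mul] at h1
    omega
  have hfull : n * (C * (H * W)) + c * (H * W) + H * W ≤ arr.length := by omega
  simp only [Function.comp_def]
  rw [List.getD_eq_getElem _ _ (by simp only [List.length_take, List.length_drop]; omega),
    List.getD_eq_getElem _ _ (by omega), List.getElem_take, List.getElem_drop]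

theorem pv_setD_nil (i v : Int) : PySem.List.pySetD ([] : List Int) i v = [] := by
  simp only [PySem.List.pySetD, PySem.List.pySet?]
  cases h' : PySem.List.pyIdx? ([] : List Int).length i <;> simp

theorem pv_foldl_nil {α : Type} (l : List α) (f : List Int → α → List Int)
    (h : ∀ x, f [] x = []) : l.foldl f [] = [] := by
  induction l with
  | nil => rfl
  | cons a t ih => rw [List.foldl_cons, h a, ih]

theorem pv_A_nil (arr : List Int) (N C H W : Int) (h : N * C * H * W ≤ 0) :
    (nchw2nhwc arr (N, C, H, W)).1 = [] := by
  unfold nchw2nhwc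
  simp only [PySem.List.pyRepeat_singleton, Int.toNat_of_nonpos h, List.replicate_zero]
  apply pv_foldl_nil
  intro n
  apply pv_foldl_nil
  intro c
  apply pv_foldl_nil
  intro hh
  apply pv_foldl_nil
  intro w
  exact pv_setD_nil _ _

theorem pv_slice00 (s : List Int) : PySem.List.slice s (some (0:Int)) (some (0:Int)) = [] := by
  simp [pysem]

theorem pv_B_nil (arr : List Int) (N C H W : Int) (h : N ≤ 0 ∨ C ≤ 0 ∨ H * W = 0) :
    (nchw2nhwc_alt arr (N, C, H, W)).1 = [] := by
  show (PySem.List.pyRange 0 N 1).foldl (fun ret n =>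
      (pvTransposeZip ((PySem.List.pyRange 0 C 1).map (fun c =>
        PySem.List.slice (PySem.List.slice arr (some (n * (C * (H * W)))) (some ((n + 1) * (C * (H * W)))))
          (some (c * (H * W))) (some ((c + 1) * (H * W)))))).foldl (fun r t => r ++ t) ret) [] = []
  rcases h with h | h | h
  · rw [PySem.List.pyRange_one_eq_nil h]
    rfl
  · rw [PySem.List.pyRange_one_eq_nil h]
    apply pv_foldl_nil
    intro n
    rfl
  · simp only [h, mul_zero, pv_slice00]
    apply pv_foldl_nil
    intro n
    cases hC : PySem.List.pyRange 0 C 1 with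
    | nil => rfl
    | cons a t => simp only [List.map_cons]; rfl

-- ===== VERDICT (by name: the statement is the Claim_ definition above) =====
theorem nchw2nhwc_spec : Claim_equal_nchw2nhwc := by
  intro arr dims _ hpre
  obtain ⟨N, C, H, W⟩ := dims
  unfold Spec_nchw2nhwc
  rcases hpre with ⟨hN, hC, hH, hW, hlen⟩ | ⟨hprod, hdeg⟩
  · lift N to Nat using hN
    lift C to Nat using hC
    lift H to Nat using hH
    lift W to Nat using hW
    have hlen' : N * C * H * W ≤ arr.length := by
      simp only [] at hlen; exact_mod_cast hlen
    refine Prod.ext ?_ rfl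
    exact ((pv_A_eq arr N C H W).trans (pv_B_eq arr N C H W hlen').symm)
  · refine Prod.ext ?_ rfl
    rw [pv_A_nil arr N C H W hprod, pv_B_nil arr N C H W hdeg]
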